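-- pv_equiv track=rewrite | github.com/syntra-vindevoy/python-1 | extra/find_letter_bounds.py | find_letter_bounds
-- ===== SOURCE A (Python) =====
-- import string
--
-- def find_letter_bounds(sentence: str) -> tuple:
--     # Only accept comparisons between A-z
--     lower_bound = chr(ord('z') + 1)
--     upper_bound = chr(ord('A') - 1)
--
--     # Begin with default low/high
--     low, high = lower_bound, upper_bound
--     for char in sentence:
--         if char in string.ascii_letters:
--             if char < low:
--                 low = char
--             if char > high:
--                 high = char
--
--     # Check if the found low/high in bounds of the default low/high
--     return (low if low < lower_bound else None,
--             high if high > upper_bound else None)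
-- ===== SOURCE B (Python) =====
-- import string
--
-- def find_letter_bounds(sentence: str) -> tuple:
--     # Scan the fixed 52-letter alphabet (in ASCII order), not the sentence:
--     # build the set of characters present once, then the low bound is the
--     # first alphabet char present and the high bound the last one present.
--     present = set(sentence)
--     ordered = sorted(string.ascii_letters)
--     low = next((c for c in ordered if c in present), None)
--     high = next((c for c in reversed(ordered) if c in present), None)
--     return (low, high)
-- ===== Notes on version B (the rewrite author's own statement) =====
-- stated objective: faster
-- what changed: Instead of A's single sentinel-tracking pass that tests every character against the 52-char ascii_letters string, B builds a set of the sentence's characters once and then scans the fixed sorted 52-letter alphabet: the first alphabet character present is the low bound and the last one present is the high bound.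
import Mathlib
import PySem

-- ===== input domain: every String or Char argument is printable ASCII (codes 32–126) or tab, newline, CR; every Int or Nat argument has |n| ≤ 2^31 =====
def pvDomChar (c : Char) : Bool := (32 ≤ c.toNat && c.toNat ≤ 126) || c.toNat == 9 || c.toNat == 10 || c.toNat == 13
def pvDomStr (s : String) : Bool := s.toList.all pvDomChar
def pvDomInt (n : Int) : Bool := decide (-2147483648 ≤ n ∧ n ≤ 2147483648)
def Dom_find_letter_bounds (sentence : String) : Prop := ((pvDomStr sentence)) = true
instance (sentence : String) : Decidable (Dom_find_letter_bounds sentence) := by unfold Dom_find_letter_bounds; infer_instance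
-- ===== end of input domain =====

-- B scans the fixed sorted 52-letter alphabet against a set of the sentence's characters instead of A's per-character sentinel-tracking pass (different algorithm; a timing run measured B faster).


-- ===== PORT A =====
-- string.ascii_letters; 'char in string.ascii_letters' for a single char = membership in this char list
def pvAsciiLetters : List Char := "abcdefghijklmnopqrstuvwxyzABCDEFGHIJKLMNOPQRSTUVWXYZ".toList

-- A's for-loop over the characters, carrying (low, high)
def pvALoop : List Char → Char × Char → Char × Char
  | [], s => s
  | c :: t, (low, high) =>
    if c ∈ pvAsciiLetters then
      pvALoop t ((if c < low then c else low), (if c > high then c else high))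
    else
      pvALoop t (low, high)

def find_letter_bounds (sentence : String) : Option String × Option String :=
  -- lower_bound = chr(ord('z')+1) = '{', upper_bound = chr(ord('A')-1) = '@'
  let lower_bound : Char := '{'
  let upper_bound : Char := '@'
  let s := pvALoop sentence.toList (lower_bound, upper_bound)
  ((if s.1 < lower_bound then some (String.ofList [s.1]) else none),
   (if s.2 > upper_bound then some (String.ofList [s.2]) else none))

-- ===== PORT B =====
def find_letter_bounds_alt (sentence : String) : Option String × Option String :=
  let present : PySem.Set Char := PySem.Set.ofList sentence.toList
  let ordered : List Char := PySem.List.sorted pvAsciiLetters (fun c => c) false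
  -- next((c for c in ordered if c in present), None)
  let low : Option Char := ordered.find? (fun c => PySem.Set.contains present c)
  -- next((c for c in reversed(ordered) if c in present), None)
  let high : Option Char := ordered.reverse.find? (fun c => PySem.Set.contains present c)
  (low.map (fun c => String.ofList [c]), high.map (fun c => String.ofList [c]))

-- ===== PRECONDITION & SPEC =====
def Spec_find_letter_bounds (sentence : String) (out : Option String × Option String) : Prop := out = find_letter_bounds_alt sentence
instance (sentence : String) (out : Option String × Option String) : Decidable (Spec_find_letter_bounds sentence out) := by unfold Spec_find_letter_bounds; infer_instance

-- ===== CLAIM =====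
def Claim_equal_find_letter_bounds : Prop := ∀ (sentence : String), Dom_find_letter_bounds sentence → Spec_find_letter_bounds sentence (find_letter_bounds sentence)

-- ===== LEMMAS AND PROOFS =====

-- B's 'ordered' list, named: sorted(string.ascii_letters) is uppercase then lowercase
def pvOrdered : List Char := "ABCDEFGHIJKLMNOPQRSTUVWXYZabcdefghijklmnopqrstuvwxyz".toList

lemma pv_ordered_eq : PySem.List.sorted pvAsciiLetters (fun c : Char => c) false = pvOrdered := by decide

lemma pv_ordered_pairwise : pvOrdered.Pairwise (· < ·) := by decide

lemma pv_mem_ordered {c : Char} : c ∈ pvOrdered ↔ c ∈ pvAsciiLetters := by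
  rw [← pv_ordered_eq]; exact PySem.List.mem_sorted pvAsciiLetters (fun c : Char => c) false c

-- every accepted letter lies strictly between the sentinels '@' and '{'
lemma pv_letter_bounds : ∀ c ∈ pvAsciiLetters, '@' < c ∧ c < '{' := by
  have h : pvAsciiLetters.all (fun c => decide ('@' < c) && decide (c < '{')) = true := by rfl
  intro c hc
  have := List.all_eq_true.mp h c hc
  simpa using this

-- A's loop is the pair of min/max folds over the filtered letters
lemma pvALoop_eq (l : List Char) (low high : Char) :
    pvALoop l (low, high) =
      ((l.filter (fun c => decide (c ∈ pvAsciiLetters))).foldl min low,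
       (l.filter (fun c => decide (c ∈ pvAsciiLetters))).foldl max high) := by
  induction l generalizing low high with
  | nil => simp [pvALoop]
  | cons c t ih =>
    by_cases hc : c ∈ pvAsciiLetters
    · have e1 : (if c < low then c else low) = min low c := by
        rcases lt_or_ge c low with h | h
        · rw [if_pos h, min_eq_right (le_of_lt h)]
        · rw [if_neg (not_lt.mpr h), min_eq_left h]
      have e2 : (if c > high then c else high) = max high c := by
        rcases lt_or_ge high c with h | h
        · rw [if_pos h, max_eq_right (le_of_lt h)]
        · rw [if_neg (not_lt.mpr h), max_eq_left h]
      simp [pvALoop, hc, e1, e2, ih]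
    · simp [pvALoop, hc, ih]

lemma pv_foldl_min_le_init (t : List Char) (a : Char) : t.foldl min a ≤ a := by
  induction t generalizing a with
  | nil => simp
  | cons x t ih => exact le_trans (ih (min a x)) (min_le_left a x)

lemma pv_init_le_foldl_max (t : List Char) (a : Char) : a ≤ t.foldl max a := by
  induction t generalizing a with
  | nil => simp
  | cons x t ih => exact le_trans (le_max_left a x) (ih (max a x))

lemma pv_foldl_min_mem (t : List Char) (a : Char) : t.foldl min a ∈ a :: t := by
  induction t generalizing a with
  | nil => simp
  | cons x t ih =>
    simp only [List.foldl_cons]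
    rcases List.mem_cons.mp (ih (min a x)) with h | h
    · rw [h]; rcases min_choice a x with hm | hm <;> rw [hm] <;> simp
    · exact List.mem_cons.mpr (Or.inr (List.mem_cons.mpr (Or.inr h)))

lemma pv_foldl_max_mem (t : List Char) (a : Char) : t.foldl max a ∈ a :: t := by
  induction t generalizing a with
  | nil => simp
  | cons x t ih =>
    simp only [List.foldl_cons]
    rcases List.mem_cons.mp (ih (max a x)) with h | h
    · rw [h]; rcases max_choice a x with hm | hm <;> rw [hm] <;> simp
    · exact List.mem_cons.mpr (Or.inr (List.mem_cons.mpr (Or.inr h)))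

lemma pv_foldl_min_le (t : List Char) (a : Char) : ∀ y ∈ a :: t, t.foldl min a ≤ y := by
  induction t generalizing a with
  | nil => intro y hy; simp at hy; simp [hy]
  | cons x t ih =>
    intro y hy
    simp only [List.foldl_cons]
    rcases List.mem_cons.mp hy with h | h
    · subst h; exact le_trans (pv_foldl_min_le_init t (min y x)) (min_le_left y x)
    · rcases List.mem_cons.mp h with h' | h'
      · subst h'; exact le_trans (pv_foldl_min_le_init t (min a y)) (min_le_right a y)
      · exact ih (min a x) y (List.mem_cons.mpr (Or.inr h'))

lemma pv_foldl_max_ge (t : List Char) (a : Char) : ∀ y ∈ a :: t, y ≤ t.foldl max a := by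
  induction t generalizing a with
  | nil => intro y hy; simp at hy; simp [hy]
  | cons x t ih =>
    intro y hy
    simp only [List.foldl_cons]
    rcases List.mem_cons.mp hy with h | h
    · subst h; exact le_trans (le_max_left y x) (pv_init_le_foldl_max t (max y x))
    · rcases List.mem_cons.mp h with h' | h'
      · subst h'; exact le_trans (le_max_right a y) (pv_init_le_foldl_max t (max a y))
      · exact ih (max a x) y (List.mem_cons.mpr (Or.inr h'))

-- on a strictly increasing list, find? returns the least element satisfying p
lemma pv_find?_min {p : Char → Bool} : ∀ {xs : List Char}, xs.Pairwise (· < ·) →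
    ∀ {m : Char}, m ∈ xs → p m = true → (∀ y ∈ xs, p y = true → m ≤ y) →
    xs.find? p = some m := by
  intro xs
  induction xs with
  | nil => intro _ m hm; exact absurd hm (List.not_mem_nil)
  | cons h t ih =>
    intro hp m hm hpm hle
    by_cases he : h = m
    · subst he; simp [hpm]
    · have hmt : m ∈ t := by
        rcases List.mem_cons.mp hm with h' | h'
        · exact absurd h'.symm he
        · exact h'
      have hph : p h = false := by
        by_contra hn
        have hph : p h = true := by simpa using hn
        have h1 : m ≤ h := hle h (List.mem_cons_self) hph
        have h2 : h < m := (List.pairwise_cons.mp hp).1 m hmt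
        exact absurd h1 (not_le.mpr h2)
      rw [List.find?_cons, hph]
      exact ih (List.pairwise_cons.mp hp).2 hmt hpm
        (fun y hy hpy => hle y (List.mem_cons.mpr (Or.inr hy)) hpy)

-- on a strictly decreasing list, find? returns the greatest element satisfying p
lemma pv_find?_max {p : Char → Bool} : ∀ {xs : List Char}, xs.Pairwise (· > ·) →
    ∀ {m : Char}, m ∈ xs → p m = true → (∀ y ∈ xs, p y = true → y ≤ m) →
    xs.find? p = some m := by
  intro xs
  induction xs with
  | nil => intro _ m hm; exact absurd hm (List.not_mem_nil)
  | cons h t ih =>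
    intro hp m hm hpm hle
    by_cases he : h = m
    · subst he; simp [hpm]
    · have hmt : m ∈ t := by
        rcases List.mem_cons.mp hm with h' | h'
        · exact absurd h'.symm he
        · exact h'
      have hph : p h = false := by
        by_contra hn
        have hph : p h = true := by simpa using hn
        have h1 : h ≤ m := hle h (List.mem_cons_self) hph
        have h2 : m < h := (List.pairwise_cons.mp hp).1 m hmt
        exact absurd h1 (not_le.mpr h2)
      rw [List.find?_cons, hph]
      exact ih (List.pairwise_cons.mp hp).2 hmt hpm
        (fun y hy hpy => hle y (List.mem_cons.mpr (Or.inr hy)) hpy)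

-- membership in B's set of present characters
lemma pv_contains_iff (S : List Char) (c : Char) :
    PySem.Set.contains (PySem.Set.ofList S) c = true ↔ c ∈ S := by
  rw [PySem.Set.contains_iff, PySem.Set.mem_ofList]

-- ===== VERDICT =====
theorem find_letter_bounds_spec : Claim_equal_find_letter_bounds := by
  intro sentence _
  unfold Spec_find_letter_bounds find_letter_bounds find_letter_bounds_alt
  simp only [pvALoop_eq, pv_ordered_eq]
  set S := sentence.toList with hS
  set p : Char → Bool := fun c => PySem.Set.contains (PySem.Set.ofList S) c with hp
  cases hL : S.filter (fun c => decide (c ∈ pvAsciiLetters)) with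
  | nil =>
    have hnone : ∀ c ∈ pvOrdered, p c = false := by
      intro c hc
      by_contra hn
      have hct : p c = true := by simpa using hn
      have hcS : c ∈ S := (pv_contains_iff S c).mp hct
      have hcA : c ∈ pvAsciiLetters := pv_mem_ordered.mp hc
      have : c ∈ S.filter (fun c => decide (c ∈ pvAsciiLetters)) :=
        List.mem_filter.mpr ⟨hcS, by simpa using hcA⟩
      rw [hL] at this; exact absurd this (List.not_mem_nil)
    have h1 : pvOrdered.find? p = none :=
      List.find?_eq_none.mpr (fun c hc => by simpa using hnone c hc)
    have h2 : pvOrdered.reverse.find? p = none :=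
      List.find?_eq_none.mpr (fun c hc => by simpa using hnone c (List.mem_reverse.mp hc))
    simp [h1, h2]
  | cons x t =>
    have hsub : ∀ y ∈ (x :: t : List Char), y ∈ S ∧ y ∈ pvAsciiLetters := by
      intro y hy
      have : y ∈ S.filter (fun c => decide (c ∈ pvAsciiLetters)) := hL ▸ hy
      have h := List.mem_filter.mp this
      exact ⟨h.1, by simpa using h.2⟩
    -- the low side
    have hmmem : t.foldl min x ∈ (x :: t : List Char) := pv_foldl_min_mem t x
    obtain ⟨hmS, hmA⟩ := hsub _ hmmem
    have hfind1 : pvOrdered.find? p = some (t.foldl min x) := by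
      apply pv_find?_min pv_ordered_pairwise (pv_mem_ordered.mpr hmA)
        ((pv_contains_iff S _).mpr hmS)
      intro y hy hpy
      have hyS : y ∈ S := (pv_contains_iff S y).mp hpy
      have hyA : y ∈ pvAsciiLetters := pv_mem_ordered.mp hy
      have hyL : y ∈ (x :: t : List Char) := by
        rw [← hL]; exact List.mem_filter.mpr ⟨hyS, by simpa using hyA⟩
      exact pv_foldl_min_le t x y hyL
    -- the high side
    have hMmem : t.foldl max x ∈ (x :: t : List Char) := pv_foldl_max_mem t x
    obtain ⟨hMS, hMA⟩ := hsub _ hMmem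
    have hrevpw : pvOrdered.reverse.Pairwise (· > ·) :=
      List.pairwise_reverse.mpr (by exact pv_ordered_pairwise)
    have hfind2 : pvOrdered.reverse.find? p = some (t.foldl max x) := by
      apply pv_find?_max hrevpw (List.mem_reverse.mpr (pv_mem_ordered.mpr hMA))
        ((pv_contains_iff S _).mpr hMS)
      intro y hy hpy
      have hyS : y ∈ S := (pv_contains_iff S y).mp hpy
      have hyA : y ∈ pvAsciiLetters := pv_mem_ordered.mp (List.mem_reverse.mp hy)
      have hyL : y ∈ (x :: t : List Char) := by
        rw [← hL]; exact List.mem_filter.mpr ⟨hyS, by simpa using hyA⟩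
      exact pv_foldl_max_ge t x y hyL
    obtain ⟨hx1, hx2⟩ := pv_letter_bounds _ hmA
    obtain ⟨hX1, hX2⟩ := pv_letter_bounds _ hMA
    have hminx : min '{' x = x := min_eq_right (le_of_lt (pv_letter_bounds x (hsub x List.mem_cons_self).2).2)
    have hmaxx : max '@' x = x := max_eq_right (le_of_lt (pv_letter_bounds x (hsub x List.mem_cons_self).2).1)
    simp only [List.foldl_cons, hminx, hmaxx, hfind1, hfind2]
    have h1 : t.foldl min x < '{' := hx2
    have h2 : '@' < t.foldl max x := hX1
    simp [h1, h2]
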